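-- pv_equiv track=rewrite | github.com/ThiefOfTime/advent_of_code_2018 | Tag5/polymer.py | improving_the_polymer
-- ===== SOURCE A (Python) =====
-- def react_polymer(data):
--     '''
--     fully react the given polymer
--
--     :param data: given data als list
--     :return: remaining polymer length
--     '''
--     # convert the data to a list
--     polymer_list = list(data)
--     count = 0
--     check = True
--     while check:
--         tmp_count = count
--         # check every element and its neighbour
--         for i, elem1 in enumerate(polymer_list[:-1]):
--             elem2 = polymer_list[i+1]
--             # if two elements match they have the same polarity
--             if elem1 == elem2:
--                 continue
--             elif elem1.lower() == elem2.lower():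
--                 # if they match while they are lowered then they have different polarities and have the same type
--                 polymer_list_tmp = polymer_list[:i]
--                 polymer_list_tmp.extend(polymer_list[i+2:])
--                 # remove from list
--                 polymer_list = polymer_list_tmp
--                 tmp_count += 1
--                 break
--         # if no more pairs are found stop
--         if count == tmp_count:
--             check = False
--         count = tmp_count
--     return len(polymer_list)
--
-- def improving_the_polymer(data):
--     """
--     search for the best improvement
--
--     :param data: given data
--     :return: best polymer length
--     """
--     # build polymer set
--     polymer = data
--     # lower the polymer string
--     polymer_low = data.lower()
--     # build a set of used letters
--     polymer_set = set(list(polymer_low))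
--     best_polymer_length = None
--     for elem in polymer_set:
--         # for every character test
--         polymer_tmp = polymer
--         # first replace lower case letters
--         polymer_tmp = polymer_tmp.replace(elem, '')
--         # next replace upper case letters
--         polymer_tmp = polymer_tmp.replace(elem.upper(), '')
--         # react the new polymer
--         len_tmp = react_polymer(polymer_tmp)
--         if best_polymer_length is None or len_tmp < best_polymer_length:
--             # if the length is better or there is by now no best length update
--             best_polymer_length = len_tmp
--     return best_polymer_length
-- ===== SOURCE B (Python) =====
-- def improving_the_polymer(data):
--     """
--     search for the best improvement
--
--     :param data: given data
--     :return: best polymer length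
--     """
--     best_polymer_length = None
--     for elem in set(data.lower()):
--         # single left-to-right pass: push a unit, pop when it reacts with the top
--         stack = []
--         for c in data:
--             if c.lower() == elem:
--                 continue
--             if stack and stack[-1] != c and stack[-1].lower() == c.lower():
--                 stack.pop()
--             else:
--                 stack.append(c)
--         n = len(stack)
--         if best_polymer_length is None or n < best_polymer_length:
--             best_polymer_length = n
--     return best_polymer_length
-- ===== Notes on version B (the rewrite author's own statement) =====
-- stated objective: alternative
-- what changed: replaces the repeated rescan-and-splice reaction loop by a single stack pass per removed unit type (push a unit, pop when it reacts with the stack top)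
import Mathlib
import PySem

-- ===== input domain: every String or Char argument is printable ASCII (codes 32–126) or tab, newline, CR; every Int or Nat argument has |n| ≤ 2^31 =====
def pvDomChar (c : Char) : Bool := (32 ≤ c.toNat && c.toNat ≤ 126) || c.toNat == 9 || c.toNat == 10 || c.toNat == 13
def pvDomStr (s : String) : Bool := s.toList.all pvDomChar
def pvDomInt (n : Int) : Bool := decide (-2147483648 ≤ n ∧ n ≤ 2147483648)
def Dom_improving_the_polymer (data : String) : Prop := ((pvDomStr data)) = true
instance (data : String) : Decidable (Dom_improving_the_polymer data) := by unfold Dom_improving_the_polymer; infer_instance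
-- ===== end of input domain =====

-- B replaces A's rescan-and-splice reaction loop by a different algorithm: a single stack pass per removed unit type (objective: alternative).

-- ===== PORT A =====
-- the 'for i, elem1 in enumerate(polymer_list[:-1])' scan of react_polymer: first adjacent
-- reacting pair is removed ('break' with the spliced list), none found = None
def pvReactScan : List Char → Option (List Char)
  | [] => none
  | [_] => none
  | a :: b :: rest =>
    if a = b then (pvReactScan (b :: rest)).map (a :: ·)
    else if PySem.Chars.lowerChar a = PySem.Chars.lowerChar b then some rest
    else (pvReactScan (b :: rest)).map (a :: ·)

theorem pvReactScan_length : ∀ {l l' : List Char}, pvReactScan l = some l' → l'.length + 2 = l.length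
  | [], _, h => by simp [pvReactScan] at h
  | [_], _, h => by simp [pvReactScan] at h
  | a :: b :: rest, l', h => by
    unfold pvReactScan at h
    split_ifs at h with h1 h2
    · cases hm : pvReactScan (b :: rest) with
      | none => rw [hm] at h; simp at h
      | some m => rw [hm] at h; simp at h; subst h; have := pvReactScan_length hm; simp only [List.length_cons] at this ⊢; omega
    · simp at h; subst h; simp
    · cases hm : pvReactScan (b :: rest) with
      | none => rw [hm] at h; simp at h
      | some m => rw [hm] at h; simp at h; subst h; have := pvReactScan_length hm; simp only [List.length_cons] at this ⊢; omega

-- the 'while check' loop of react_polymer: repeat until no pair reacts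
def pvReactLoop (l : List Char) : List Char :=
  match h : pvReactScan l with
  | some l' => pvReactLoop l'
  | none => l
termination_by l.length
decreasing_by have := pvReactScan_length h; omega

-- react_polymer: returns the remaining polymer length
def pvReactPolymer (s : String) : Int := ((pvReactLoop s.toList).length : Int)

def improving_the_polymer (data : String) : Option Int :=
  let polymerLow := PySem.Str.lower data
  let polymerSet := PySem.Set.ofList polymerLow.toList
  polymerSet.foldl (fun best elem =>
    let tmp1 := PySem.Str.replace data (String.ofList [elem]) (String.ofList [])
    let tmp2 := PySem.Str.replace tmp1 (String.ofList [PySem.Chars.upperChar elem]) (String.ofList [])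
    let lenTmp : Int := pvReactPolymer tmp2
    match best with
    | none => some lenTmp
    | some b => if lenTmp < b then some lenTmp else best) none

-- ===== PORT B =====
-- push a unit on the stack; pop when it reacts with the top
def pvStep (s : List Char) (c : Char) : List Char :=
  match s with
  | t :: rest =>
    if t ≠ c ∧ PySem.Chars.lowerChar t = PySem.Chars.lowerChar c then rest else c :: t :: rest
  | [] => [c]

def improving_the_polymer_alt (data : String) : Option Int :=
  (PySem.Set.ofList (PySem.Chars.lower data.toList)).foldl (fun best elem =>
    let stack := data.toList.foldl
      (fun st c => if PySem.Chars.lowerChar c == elem then st else pvStep st c) []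
    let n : Int := stack.length
    match best with
    | none => some n
    | some b => if n < b then some n else best) none

-- ===== PRECONDITION & SPEC =====
def Spec_improving_the_polymer (data : String) (out : Option Int) : Prop := out = improving_the_polymer_alt data
instance (data : String) (out : Option Int) : Decidable (Spec_improving_the_polymer data out) := by unfold Spec_improving_the_polymer; infer_instance

-- ===== CLAIM (what is proved, stated in full; the proofs are below) =====
def Claim_equal_improving_the_polymer : Prop := ∀ (data : String), Dom_improving_the_polymer data → Spec_improving_the_polymer data (improving_the_polymer data)

-- ===== LEMMAS AND PROOFS =====

theorem pvToNat_inj {a b : Char} (h : a.toNat = b.toNat) : a = b := by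
  rw [← Char.ofNat_toNat a, ← Char.ofNat_toNat b, h]
theorem pvToNat_ofNat {n : Nat} (h : n < 55296) : (Char.ofNat n).toNat = n := by
  unfold Char.ofNat
  rw [dif_pos (Or.inl h : Nat.isValidChar n)]
  rfl
theorem pvLe_iff {a b : Char} : a ≤ b ↔ a.toNat ≤ b.toNat := by
  rw [Char.le_def, UInt32.le_iff_toNat_le]; rfl
theorem pvLowerChar_toNat (c : Char) :
    (PySem.Chars.lowerChar c).toNat = if 65 ≤ c.toNat ∧ c.toNat ≤ 90 then c.toNat + 32 else c.toNat := by
  unfold PySem.Chars.lowerChar PySem.Chars.isupper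
  by_cases h : 65 ≤ c.toNat ∧ c.toNat ≤ 90
  · rw [if_pos, if_pos h]
    · exact pvToNat_ofNat (by omega)
    · simp only [Bool.and_eq_true, decide_eq_true_eq, pvLe_iff]
      exact ⟨h.1, h.2⟩
  · rw [if_neg, if_neg h]
    simp only [Bool.and_eq_true, decide_eq_true_eq, pvLe_iff]
    exact h
theorem pvUpperChar_toNat (c : Char) :
    (PySem.Chars.upperChar c).toNat = if 97 ≤ c.toNat ∧ c.toNat ≤ 122 then c.toNat - 32 else c.toNat := by
  unfold PySem.Chars.upperChar PySem.Chars.islower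
  by_cases h : 97 ≤ c.toNat ∧ c.toNat ≤ 122
  · rw [if_pos, if_pos h]
    · exact pvToNat_ofNat (by omega)
    · simp only [Bool.and_eq_true, decide_eq_true_eq, pvLe_iff]
      exact ⟨h.1, h.2⟩
  · rw [if_neg, if_neg h]
    simp only [Bool.and_eq_true, decide_eq_true_eq, pvLe_iff]
    exact h
-- two distinct characters with the same lowercase are an upper/lower pair
theorem pvLowPair {c d : Char} (h : c ≠ d) (he : PySem.Chars.lowerChar c = PySem.Chars.lowerChar d) :
    (65 ≤ c.toNat ∧ c.toNat ≤ 90 ∧ d.toNat = c.toNat + 32) ∨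
    (65 ≤ d.toNat ∧ d.toNat ≤ 90 ∧ c.toNat = d.toNat + 32) := by
  have h1 := pvLowerChar_toNat c
  have h2 := pvLowerChar_toNat d
  have he' : (PySem.Chars.lowerChar c).toNat = (PySem.Chars.lowerChar d).toNat := by rw [he]
  have hne : c.toNat ≠ d.toNat := fun hn => h (pvToNat_inj hn)
  split_ifs at h1 h2 <;> omega
-- uniqueness: the partner of a under 'reacts' is unique
theorem pvUnique {t a b : Char} (h1 : t ≠ a) (h2 : PySem.Chars.lowerChar t = PySem.Chars.lowerChar a)
    (h3 : b ≠ a) (h4 : PySem.Chars.lowerChar b = PySem.Chars.lowerChar a) : t = b := by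
  rcases pvLowPair h1 h2 with ⟨p1, p2, p3⟩ | ⟨p1, p2, p3⟩ <;>
    rcases pvLowPair h3 h4 with ⟨q1, q2, q3⟩ | ⟨q1, q2, q3⟩ <;>
    exact pvToNat_inj (by omega)
theorem pvLowEq {c e : Char} (he : PySem.Chars.isupper e = false) :
    PySem.Chars.lowerChar c = e ↔ (c = e ∨ c = PySem.Chars.upperChar e) := by
  have hue : ¬(65 ≤ e.toNat ∧ e.toNat ≤ 90) := by
    unfold PySem.Chars.isupper at he
    simpa only [Bool.and_eq_false_iff, decide_eq_false_iff_not, pvLe_iff, ← not_and_or] using he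
  have h1 := pvLowerChar_toNat c
  have h2 := pvUpperChar_toNat e
  constructor
  · intro h
    have ht : (PySem.Chars.lowerChar c).toNat = e.toNat := by rw [h]
    by_cases hc : 65 ≤ c.toNat ∧ c.toNat ≤ 90
    · right; exact pvToNat_inj (by rw [if_pos hc] at h1; rw [if_pos (by omega)] at h2; omega)
    · left; exact pvToNat_inj (by rw [if_neg hc] at h1; omega)
  · rintro (rfl | rfl)
    · exact pvToNat_inj (by rw [if_neg (by omega)] at h1; omega)
    · by_cases hl : 97 ≤ e.toNat ∧ e.toNat ≤ 122
      · rw [if_pos hl] at h2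
        refine pvToNat_inj ?_
        rw [if_pos (by omega)] at h1
        omega
      · rw [if_neg hl] at h2
        refine pvToNat_inj ?_
        rw [if_neg (by omega)] at h1
        omega
theorem pvIsupper_lowerChar (x : Char) : PySem.Chars.isupper (PySem.Chars.lowerChar x) = false := by
  have h1 := pvLowerChar_toNat x
  unfold PySem.Chars.isupper
  simp only [Bool.and_eq_false_iff, decide_eq_false_iff_not, pvLe_iff, ← not_and_or,
    Char.reduceToNat]
  split_ifs at h1 <;> omega
-- str.replace(old, '') with a single-character old is a filter
theorem pvGo (e : Char) (l : List Char) : ∀ (fuel : Nat) (acc : List Char), l.length ≤ fuel →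
    PySem.Chars.replace.go [e] [] fuel l acc = acc.reverse ++ l.filter (fun c => !(c == e)) := by
  induction l with
  | nil => intro fuel acc _; cases fuel <;> simp [PySem.Chars.replace.go]
  | cons c t ih =>
    intro fuel acc hf
    match fuel, hf with
    | fuel + 1, hf =>
      unfold PySem.Chars.replace.go
      by_cases hc : c = e
      · subst hc
        rw [if_pos (by simp [List.isPrefixOf])]
        simp only [List.length_cons, List.length_nil, List.drop_succ_cons, List.drop_zero,
          List.reverse_nil, List.nil_append]
        rw [ih fuel acc (by simp at hf; omega)]
        simp
      · rw [if_neg (by simp [List.isPrefixOf]; exact fun h => hc h.symm)]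
        rw [ih fuel (c :: acc) (by simp at hf; omega)]
        simp [hc]
theorem pvReplace_filter (s : List Char) (e : Char) :
    PySem.Chars.replace s [e] [] = s.filter (fun c => !(c == e)) := by
  unfold PySem.Chars.replace
  rw [if_neg (by simp)]
  simpa using pvGo e s s.length [] le_rfl
theorem pvStep_cons (t c : Char) (rest : List Char) :
    pvStep (t :: rest) c =
      if t ≠ c ∧ PySem.Chars.lowerChar t = PySem.Chars.lowerChar c then rest else c :: t :: rest := rfl
theorem pvStep_nil (c : Char) : pvStep [] c = [c] := rfl
def pvOk (x y : Char) : Prop := ¬(x ≠ y ∧ PySem.Chars.lowerChar x = PySem.Chars.lowerChar y)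
def pvGood (s : List Char) : Prop := List.IsChain pvOk s

theorem pvOk_symm {x y : Char} (h : pvOk x y) : pvOk y x := by
  unfold pvOk at *
  rintro ⟨h1, h2⟩
  exact h ⟨fun e => h1 e.symm, h2.symm⟩

theorem pvGood_tail {t : Char} {rest : List Char} (h : pvGood (t :: rest)) : pvGood rest := by
  unfold pvGood at *
  rcases (List.isChain_cons_iff _ _ _).mp h with rfl | ⟨b, l', _, hc, rfl⟩
  · exact List.isChain_nil
  · exact hc

theorem pvStep_good {s : List Char} {c : Char} (h : pvGood s) : pvGood (pvStep s c) := by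
  cases s with
  | nil => exact List.isChain_singleton c
  | cons t rest =>
    rw [pvStep_cons]
    by_cases hr : t ≠ c ∧ PySem.Chars.lowerChar t = PySem.Chars.lowerChar c
    · rw [if_pos hr]; exact pvGood_tail h
    · rw [if_neg hr]
      exact List.IsChain.cons_cons (pvOk_symm hr) h

theorem pvStep_cancel {s : List Char} {a b : Char} (hg : pvGood s) (hab : a ≠ b)
    (hl : PySem.Chars.lowerChar a = PySem.Chars.lowerChar b) :
    pvStep (pvStep s a) b = s := by
  cases s with
  | nil =>
    rw [pvStep_nil, pvStep_cons, if_pos ⟨hab, hl⟩]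
  | cons t rest =>
    by_cases hr : t ≠ a ∧ PySem.Chars.lowerChar t = PySem.Chars.lowerChar a
    · have htb : t = b := pvUnique hr.1 hr.2 (fun e => hab e.symm) hl.symm
      subst htb
      rw [pvStep_cons, if_pos hr]
      cases rest with
      | nil => rfl
      | cons u r2 =>
        have hok : pvOk t u := ((List.isChain_cons_cons).mp hg).1
        rw [pvStep_cons, if_neg (fun hc => hok ⟨fun e => hc.1 e.symm, hc.2.symm⟩)]
    · rw [pvStep_cons, if_neg hr, pvStep_cons, if_pos ⟨hab, hl⟩]

theorem pvFoldl_good {l : List Char} : ∀ {s : List Char}, pvGood s → pvGood (l.foldl pvStep s) := by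
  induction l with
  | nil => intro s h; exact h
  | cons c t ih => intro s h; exact ih (pvStep_good h)

theorem pvFoldl_cancel {a b : Char} (hab : a ≠ b)
    (hl : PySem.Chars.lowerChar a = PySem.Chars.lowerChar b) (xs ys : List Char) :
    (xs ++ a :: b :: ys).foldl pvStep [] = (xs ++ ys).foldl pvStep [] := by
  rw [List.foldl_append, List.foldl_append]
  have hg : pvGood (xs.foldl pvStep []) := pvFoldl_good List.isChain_nil
  show (a :: b :: ys).foldl pvStep (xs.foldl pvStep []) = ys.foldl pvStep (xs.foldl pvStep [])
  simp only [List.foldl_cons]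
  rw [pvStep_cancel hg hab hl]

theorem pvReactScan_some {l l' : List Char} (h : pvReactScan l = some l') :
    ∃ xs a b ys, l = xs ++ a :: b :: ys ∧ l' = xs ++ ys ∧ a ≠ b ∧
      PySem.Chars.lowerChar a = PySem.Chars.lowerChar b := by
  induction l generalizing l' with
  | nil => simp [pvReactScan] at h
  | cons a t ih =>
    cases t with
    | nil => simp [pvReactScan] at h
    | cons b rest =>
      unfold pvReactScan at h
      split_ifs at h with h1 h2
      · cases hm : pvReactScan (b :: rest) with
        | none => rw [hm] at h; simp at h
        | some m =>
          rw [hm] at h; simp at h; subst h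
          obtain ⟨xs, x, y, ys, he, hm', hxy, hlo⟩ := ih hm
          exact ⟨a :: xs, x, y, ys, by simp [he], by simp [hm'], hxy, hlo⟩
      · simp at h; subst h
        exact ⟨[], a, b, rest, rfl, rfl, h1, h2⟩
      · cases hm : pvReactScan (b :: rest) with
        | none => rw [hm] at h; simp at h
        | some m =>
          rw [hm] at h; simp at h; subst h
          obtain ⟨xs, x, y, ys, he, hm', hxy, hlo⟩ := ih hm
          exact ⟨a :: xs, x, y, ys, by simp [he], by simp [hm'], hxy, hlo⟩

theorem pvReactScan_none {l : List Char} (h : pvReactScan l = none) : pvGood l := by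
  induction l with
  | nil => exact List.isChain_nil
  | cons a t ih =>
    cases t with
    | nil => exact List.isChain_singleton a
    | cons b rest =>
      unfold pvReactScan at h
      split_ifs at h with h1 h2
      · have hm : pvReactScan (b :: rest) = none := by
          cases hx : pvReactScan (b :: rest) <;> rw [hx] at h <;> simp at h ⊢
        exact List.IsChain.cons_cons (fun hc => hc.1 h1) (ih hm)
      · have hm : pvReactScan (b :: rest) = none := by
          cases hx : pvReactScan (b :: rest) <;> rw [hx] at h <;> simp at h ⊢
        exact List.IsChain.cons_cons (fun hc => h2 hc.2) (ih hm)

theorem pvReactLoop_stack (l : List Char) :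
    (pvReactLoop l).foldl pvStep [] = l.foldl pvStep [] := by
  induction l using pvReactLoop.induct with
  | case1 l l' hscan ih =>
    have h1 : pvReactLoop l = pvReactLoop l' := by rw [pvReactLoop.eq_def]; split <;> simp_all
    obtain ⟨xs, a, b, ys, he, he', hab, hlo⟩ := pvReactScan_some hscan
    rw [h1, ih, he, he', pvFoldl_cancel hab hlo]
  | case2 l hscan =>
    have h1 : pvReactLoop l = l := by rw [pvReactLoop.eq_def]; split <;> simp_all
    rw [h1]

theorem pvReactScan_reactLoop (l : List Char) : pvReactScan (pvReactLoop l) = none := by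
  induction l using pvReactLoop.induct with
  | case1 l l' hscan ih =>
    have h1 : pvReactLoop l = pvReactLoop l' := by rw [pvReactLoop.eq_def]; split <;> simp_all
    rw [h1]; exact ih
  | case2 l hscan =>
    have h1 : pvReactLoop l = l := by rw [pvReactLoop.eq_def]; split <;> simp_all
    rw [h1]; exact hscan

theorem pvFoldl_of_good : ∀ (l s : List Char), pvGood l →
    (∀ t c, s.head? = some t → l.head? = some c → pvOk t c) →
    l.foldl pvStep s = l.reverse ++ s := by
  intro l
  induction l with
  | nil => intro s _ _; simp
  | cons c l2 ih =>
    intro s hg hh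
    have hstep : pvStep s c = c :: s := by
      cases s with
      | nil => rfl
      | cons t rest =>
        rw [pvStep_cons, if_neg]
        exact fun hc => (hh t c rfl rfl) hc
    rw [List.foldl_cons, hstep, ih (c :: s) (pvGood_tail hg)]
    · simp
    · intro t d ht hd
      simp at ht
      subst ht
      cases l2 with
      | nil => simp at hd
      | cons d' l3 =>
        simp at hd
        subst hd
        exact ((List.isChain_cons_cons).mp hg).1

-- the central fact: A's repeated-rescan reduction and B's stack pass agree in length
theorem pvMain (l : List Char) : (pvReactLoop l).length = (l.foldl pvStep []).length := by
  have hg : pvGood (pvReactLoop l) := pvReactScan_none (pvReactScan_reactLoop l)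
  have h1 : (pvReactLoop l).foldl pvStep [] = (pvReactLoop l).reverse ++ [] :=
    pvFoldl_of_good _ [] hg (by intro t c ht; simp at ht)
  have h2 := pvReactLoop_stack l
  rw [← h2, h1]
  simp
theorem pvFilter_eq (data : List Char) (e : Char) (hu : PySem.Chars.isupper e = false) :
    ((data.filter (fun c => !(c == e))).filter (fun c => !(c == PySem.Chars.upperChar e)))
      = data.filter (fun c => !(PySem.Chars.lowerChar c == e)) := by
  rw [List.filter_filter]
  apply List.filter_congr
  intro c _
  have h := pvLowEq (c := c) hu
  by_cases hc : PySem.Chars.lowerChar c = e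
  · rcases h.mp hc with rfl | rfl
    · rw [hc]; simp only [beq_self_eq_true, Bool.not_true, Bool.and_false]
    · rw [hc]; simp only [beq_self_eq_true, Bool.not_true, Bool.false_and]
  · have h1 : (c == e) = false := beq_eq_false_iff_ne.mpr (fun e1 => hc (h.mpr (Or.inl e1)))
    have h2 : (c == PySem.Chars.upperChar e) = false :=
      beq_eq_false_iff_ne.mpr (fun e2 => hc (h.mpr (Or.inr e2)))
    have h3 : (PySem.Chars.lowerChar c == e) = false := beq_eq_false_iff_ne.mpr hc
    rw [h1, h2, h3]
    rfl
theorem pvBody (data : String) (elem : Char) (hu : PySem.Chars.isupper elem = false) :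
    pvReactPolymer (PySem.Str.replace (PySem.Str.replace data (String.ofList [elem]) (String.ofList []))
        (String.ofList [PySem.Chars.upperChar elem]) (String.ofList []))
      = ((data.toList.foldl
          (fun st c => if PySem.Chars.lowerChar c == elem then st else pvStep st c) []).length : Int) := by
  unfold pvReactPolymer
  have hts : (PySem.Str.replace (PySem.Str.replace data (String.ofList [elem]) (String.ofList []))
      (String.ofList [PySem.Chars.upperChar elem]) (String.ofList [])).toList
      = data.toList.filter (fun c => !(PySem.Chars.lowerChar c == elem)) := by
    simp only [PySem.Str.toList_replace, String.toList_ofList]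
    rw [pvReplace_filter, pvReplace_filter, pvFilter_eq data.toList elem hu]
  rw [hts]
  have hB : data.toList.foldl
      (fun st c => if PySem.Chars.lowerChar c == elem then st else pvStep st c) []
      = (data.toList.filter (fun c => !(PySem.Chars.lowerChar c == elem))).foldl pvStep [] := by
    rw [List.foldl_filter]
    apply PySem.List.foldl_congr_mem
    intro acc x _
    cases hx2 : (PySem.Chars.lowerChar x == elem) <;> simp
  rw [hB]
  exact congrArg Nat.cast (pvMain _)

theorem claim_main (data : String) : improving_the_polymer data = improving_the_polymer_alt data := by
  unfold improving_the_polymer improving_the_polymer_alt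
  simp only [PySem.Str.toList_lower]
  apply PySem.List.foldl_congr_mem
  intro acc elem hmem
  have hmem' : elem ∈ PySem.Chars.lower data.toList := (PySem.Set.mem_ofList _ _).mp hmem
  obtain ⟨x, hx, rfl⟩ : ∃ x, x ∈ data.toList ∧ PySem.Chars.lowerChar x = elem := by
    simpa [PySem.Chars.lower] using hmem'
  rw [pvBody data _ (pvIsupper_lowerChar x)]

-- ===== VERDICT (by name: the statement is the Claim_ definition above) =====
theorem improving_the_polymer_spec : Claim_equal_improving_the_polymer := by
  intro data _
  exact claim_main data
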